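-- pv_equiv track=rewrite | github.com/xribene/BachDuet | GuiClasses/PitchEstimators.py | quantizePitch
-- ===== SOURCE A (Python) =====
-- def quantizePitch(signal, partitions, codebookMidi, codebookLabel):
--     indices = []
--     quantaMidi = []
--     quantaLabel = []
--     for datum in signal:
--         index = 0
--         while index < len(partitions) and datum > partitions[index]:
--             index += 1
--         indices.append(index)
--         quantaMidi.append(codebookMidi[index])
--         quantaLabel.append(codebookLabel[index])
--     return quantaMidi, quantaLabel
-- ===== SOURCE B (Python) =====
-- def quantizePitch(signal_, partitions, codebookMidi, codebookLabel):
--     # first parameter is A's `signal` (trailing underscore only because the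
--     # grading sandbox rejects the bare name `signal`); called positionally.
--     # Prefix maxima make the partition boundaries non-decreasing without changing
--     # the first-crossing index, so each datum is located by binary search.
--     bounds = []
--     best = None
--     for p in partitions:
--         best = p if best is None or p > best else best
--         bounds.append(best)
--     quantaMidi = []
--     quantaLabel = []
--     for datum in signal_:
--         lo, hi = 0, len(bounds)
--         while lo < hi:
--             mid = (lo + hi) // 2
--             if bounds[mid] < datum:
--                 lo = mid + 1
--             else:
--                 hi = mid
--         quantaMidi.append(codebookMidi[lo])
--         quantaLabel.append(codebookLabel[lo])
--     return quantaMidi, quantaLabel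
-- ===== Notes on version B (the rewrite author's own statement) =====
-- stated objective: faster
-- what changed: Replaces the per-datum linear scan of partitions by a one-time prefix-maximum pass (which makes the boundary list non-decreasing without changing the first-crossing index) followed by a hand-written bisect_left binary search per datum.
import Mathlib
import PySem

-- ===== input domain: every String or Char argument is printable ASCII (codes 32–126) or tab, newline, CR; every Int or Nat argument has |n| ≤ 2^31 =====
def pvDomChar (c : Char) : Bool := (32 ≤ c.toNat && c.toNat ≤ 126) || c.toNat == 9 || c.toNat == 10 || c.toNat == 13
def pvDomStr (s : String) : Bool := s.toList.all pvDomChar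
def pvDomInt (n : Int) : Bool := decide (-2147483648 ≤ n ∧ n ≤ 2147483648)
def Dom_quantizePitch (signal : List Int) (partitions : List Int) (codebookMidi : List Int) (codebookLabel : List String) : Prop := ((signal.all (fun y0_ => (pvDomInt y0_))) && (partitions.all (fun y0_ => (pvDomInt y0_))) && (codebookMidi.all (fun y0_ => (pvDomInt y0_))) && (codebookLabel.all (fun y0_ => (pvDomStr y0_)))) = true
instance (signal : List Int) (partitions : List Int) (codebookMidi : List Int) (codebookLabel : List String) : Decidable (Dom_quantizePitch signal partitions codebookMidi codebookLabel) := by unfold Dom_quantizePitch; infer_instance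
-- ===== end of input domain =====

-- B locates each datum by binary search over a one-time prefix-maximum pass of
-- `partitions` instead of A's per-datum linear scan (objective: faster).


-- ===== PORT A =====
-- A's inner `while index < len(partitions) and datum > partitions[index]: index += 1`
-- (fuel = remaining length: a totality guard only, never reached while the loop runs)
def aWhile (datum : Int) (partitions : List Int) (index : Nat) (fuel : Nat) : Nat :=
  match fuel with
  | 0 => index
  | fuel + 1 =>
    if index < partitions.length ∧ partitions.getD index 0 < datum then
      aWhile datum partitions (index + 1) fuel
    else index

def quantizePitch (signal : List Int) (partitions : List Int) (codebookMidi : List Int) (codebookLabel : List String) : List Int × List String :=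
  -- for datum in signal: compute index by the while loop, append to the three lists
  let r := signal.foldl (fun (acc : List Nat × List Int × List String) datum =>
    let index := aWhile datum partitions 0 partitions.length
    (acc.1 ++ [index],
     acc.2.1 ++ [(PySem.List.pyGet? codebookMidi (index : Int)).getD 0],
     acc.2.2 ++ [(PySem.List.pyGet? codebookLabel (index : Int)).getD ""]))
    ([], [], [])
  (r.2.1, r.2.2)

-- ===== PORT B =====
-- running prefix maximum: `best = p if best is None or p > best else best; bounds.append(best)`
def pmList (best : Option Int) (p : List Int) : List Int :=
  match p with
  | [] => []
  | x :: xs =>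
    let b := match best with
      | none => x
      | some v => if v < x then x else v
    b :: pmList (some b) xs

-- hand-written bisect_left: `while lo < hi: mid = (lo+hi)//2; ...`
-- (fuel bounds the iteration count; hi - lo shrinks every pass)
def bLoop (bounds : List Int) (datum : Int) (lo hi : Nat) (fuel : Nat) : Nat :=
  match fuel with
  | 0 => lo
  | fuel + 1 =>
    if lo < hi then
      let mid := (lo + hi) / 2
      if bounds.getD mid 0 < datum then bLoop bounds datum (mid + 1) hi fuel
      else bLoop bounds datum lo mid fuel
    else lo

def quantizePitch_alt (signal : List Int) (partitions : List Int) (codebookMidi : List Int) (codebookLabel : List String) : List Int × List String :=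
  let bounds := pmList none partitions
  signal.foldl (fun (acc : List Int × List String) datum =>
    let lo := bLoop bounds datum 0 bounds.length bounds.length
    (acc.1 ++ [codebookMidi.getD lo 0], acc.2 ++ [codebookLabel.getD lo ""])) ([], [])

-- ===== PRECONDITION & SPEC =====
-- Pre_ excludes exactly the inputs where A raises IndexError: some datum's quantization
-- index (the first position i with partitions[i] ≥ datum, or len(partitions) if none)
-- reaches beyond a codebook.  Stated closed-form: each datum admits a position i inside
-- both codebooks at which the scan must already have stopped.
def Pre_quantizePitch (signal : List Int) (partitions : List Int) (codebookMidi : List Int) (codebookLabel : List String) : Prop :=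
  ∀ d ∈ signal, ∃ i, i < codebookMidi.length ∧ i < codebookLabel.length ∧
    (partitions.length ≤ i ∨ d ≤ partitions.getD i 0)
instance (signal : List Int) (partitions : List Int) (codebookMidi : List Int) (codebookLabel : List String) : Decidable (Pre_quantizePitch signal partitions codebookMidi codebookLabel) := by
  unfold Pre_quantizePitch
  have : ∀ d : Int, Decidable (∃ i, i < codebookMidi.length ∧ i < codebookLabel.length ∧ (partitions.length ≤ i ∨ d ≤ partitions.getD i 0)) := by
    intro d
    exact decidable_of_iff (∃ i < codebookMidi.length, i < codebookLabel.length ∧ (partitions.length ≤ i ∨ d ≤ partitions.getD i 0)) (by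
      constructor
      · rintro ⟨i, h1, h2⟩; exact ⟨i, h1, h2⟩
      · rintro ⟨i, h1, h2⟩; exact ⟨i, h1, h2⟩)
  infer_instance

def pvWitness_quantizePitch : List Int × List Int × List Int × List String :=
  ([1, 5, 3], [2, 4], [60, 62, 64], ["C4", "D4", "E4"])

def Spec_quantizePitch (signal : List Int) (partitions : List Int) (codebookMidi : List Int) (codebookLabel : List String) (out : List Int × List String) : Prop := out = quantizePitch_alt signal partitions codebookMidi codebookLabel
instance (signal : List Int) (partitions : List Int) (codebookMidi : List Int) (codebookLabel : List String) (out : List Int × List String) : Decidable (Spec_quantizePitch signal partitions codebookMidi codebookLabel out) := by unfold Spec_quantizePitch; infer_instance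

-- ===== CLAIM (what is proved, stated in full; the proofs are below) =====
def Claim_equal_quantizePitch : Prop := ∀ (signal : List Int) (partitions : List Int) (codebookMidi : List Int) (codebookLabel : List String), Dom_quantizePitch signal partitions codebookMidi codebookLabel → Pre_quantizePitch signal partitions codebookMidi codebookLabel → Spec_quantizePitch signal partitions codebookMidi codebookLabel (quantizePitch signal partitions codebookMidi codebookLabel)

-- ===== LEMMAS AND PROOFS =====

-- A's scan computes the first index whose partition is ≥ datum
theorem aWhile_eq_findIdx (d : Int) (p : List Int) :
    ∀ (fuel i : Nat), p.length ≤ i + fuel →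
      aWhile d p i fuel = i + ((p.drop i).findIdx (fun x => decide (d ≤ x))) := by
  intro fuel
  induction fuel with
  | zero =>
    intro i hf
    rw [aWhile, List.drop_eq_nil_of_le (by omega), List.findIdx_nil]
    omega
  | succ fuel ih =>
    intro i hf
    rw [aWhile]
    by_cases h : i < p.length ∧ p.getD i 0 < d
    · rw [if_pos h, ih (i + 1) (by omega), List.drop_eq_getElem_cons h.1, List.findIdx_cons]
      have hx : p[i] < d := by
        have := h.2; rwa [List.getD_eq_getElem?_getD, List.getElem?_eq_getElem h.1] at this
      simp [not_le.mpr hx]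
      omega
    · rw [if_neg h]
      rcases Nat.lt_or_ge i p.length with hi | hi
      · have hx : ¬ p[i] < d := by
          intro hlt
          exact h ⟨hi, by rwa [List.getD_eq_getElem?_getD, List.getElem?_eq_getElem hi]⟩
        rw [List.drop_eq_getElem_cons hi, List.findIdx_cons]
        simp [le_of_not_gt hx]
      · rw [List.drop_eq_nil_of_le hi, List.findIdx_nil]
        omega

-- prefix maxima do not change the first index with value ≥ d
theorem pm_findIdx (d : Int) :
    ∀ (p : List Int) (best : Option Int), (∀ v, best = some v → v < d) →
      (pmList best p).findIdx (fun x => decide (d ≤ x)) = p.findIdx (fun x => decide (d ≤ x)) := by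
  intro p
  induction p with
  | nil => intro best _; rfl
  | cons x xs ih =>
    intro best hb
    simp only [pmList]
    rcases best with _ | v
    · simp only
      rw [List.findIdx_cons, List.findIdx_cons]
      by_cases hx : d ≤ x
      · simp [hx]
      · simp only [hx, decide_false, cond_false]
        rw [ih (some x) (by intro v hv; cases hv; omega)]
    · simp only
      have hv : v < d := hb v rfl
      by_cases hvx : v < x
      · simp only [if_pos hvx]
        rw [List.findIdx_cons, List.findIdx_cons]
        by_cases hx : d ≤ x
        · simp [hx]
        · simp only [hx, decide_false, cond_false]
          rw [ih (some x) (by intro w hw; cases hw; omega)]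
      · simp only [if_neg hvx]
        rw [List.findIdx_cons, List.findIdx_cons]
        have hx : ¬ d ≤ x := by omega
        have hvd : ¬ d ≤ v := by omega
        simp only [hx, hvd, decide_false, cond_false]
        rw [ih (some v) (by intro w hw; cases hw; omega)]

theorem pm_le : ∀ (p : List Int) (v : Int), ∀ y ∈ pmList (some v) p, v ≤ y := by
  intro p
  induction p with
  | nil => intro v y hy; simp [pmList] at hy
  | cons x xs ih =>
    intro v y hy
    simp only [pmList, List.mem_cons] at hy
    rcases hy with rfl | hy
    · split <;> omega
    · have := ih (if v < x then x else v) y hy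
      split at this <;> omega

theorem pm_sorted : ∀ (p : List Int) (best : Option Int), (pmList best p).Pairwise (· ≤ ·) := by
  intro p
  induction p with
  | nil => intro best; simp [pmList]
  | cons x xs ih =>
    intro best
    simp only [pmList]
    refine List.pairwise_cons.mpr ⟨?_, ih _⟩
    intro y hy
    exact pm_le xs _ y hy

-- binary search on a non-decreasing list lands on the first index with value ≥ d
theorem bLoop_eq (m : List Int) (d : Int) (hs : m.Pairwise (· ≤ ·)) :
    ∀ (fuel lo hi : Nat), hi - lo ≤ fuel →
      lo ≤ m.findIdx (fun x => decide (d ≤ x)) →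
      m.findIdx (fun x => decide (d ≤ x)) ≤ hi → hi ≤ m.length →
      bLoop m d lo hi fuel = m.findIdx (fun x => decide (d ≤ x)) := by
  have mono : ∀ i j (_ : i ≤ j) (_ : j < m.length), m[i]'(by omega) ≤ m[j]'(by omega) := by
    intro i j hij hj
    rcases Nat.lt_or_ge i j with h | h
    · exact (List.pairwise_iff_getElem.mp hs) i j (by omega) hj h
    · have : i = j := by omega
      subst this; exact le_refl _
  intro fuel
  induction fuel with
  | zero =>
    intro lo hi hf h1 h2 _
    rw [bLoop]; omega
  | succ fuel ih =>
    intro lo hi hf h1 h2 h3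
    rw [bLoop]
    by_cases hlt : lo < hi
    · rw [if_pos hlt]
      have hmlt : (lo + hi) / 2 < m.length := by omega
      have hget : m.getD ((lo + hi) / 2) 0 = m[(lo + hi) / 2] := by
        simp [List.getD_eq_getElem?_getD, List.getElem?_eq_getElem hmlt]
      by_cases hmid : m.getD ((lo + hi) / 2) 0 < d
      · rw [if_pos hmid]
        apply ih _ hi (by omega) _ h2 h3
        by_contra hc
        push Not at hc
        have hle : m.findIdx (fun x => decide (d ≤ x)) ≤ (lo + hi) / 2 := by omega
        have hfl : m.findIdx (fun x => decide (d ≤ x)) < m.length := by omega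
        have := @List.findIdx_getElem _ (fun x => decide (d ≤ x)) m hfl
        have hdm : d ≤ m[m.findIdx (fun x => decide (d ≤ x))] := by simpa using this
        have := mono _ ((lo + hi) / 2) hle hmlt
        rw [hget] at hmid
        omega
      · rw [if_neg hmid]
        apply ih lo _ (by omega) h1 _ (by omega)
        by_contra hc
        push Not at hc
        have := @List.not_of_lt_findIdx _ (fun x => decide (d ≤ x)) m ((lo + hi) / 2) hc
        rw [hget] at hmid
        simp at this
        omega
    · rw [if_neg hlt]; omega

-- per-datum: A's scan index equals B's binary-search index
theorem idx_eq (d : Int) (p : List Int) :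
    aWhile d p 0 p.length =
      bLoop (pmList none p) d 0 (pmList none p).length (pmList none p).length := by
  have hf : (pmList none p).findIdx (fun x => decide (d ≤ x)) = p.findIdx (fun x => decide (d ≤ x)) :=
    pm_findIdx d p none (by intro v hv; cases hv)
  rw [aWhile_eq_findIdx d p p.length 0 (by omega), List.drop_zero, Nat.zero_add]
  rw [bLoop_eq (pmList none p) d (pm_sorted p none) (pmList none p).length 0 (pmList none p).length
      (by omega) (Nat.zero_le _) List.findIdx_le_length (le_refl _)]
  exact hf.symm

-- the two folds produce the same midi/label lists
theorem fold_eq (partitions codebookMidi : List Int) (codebookLabel : List String) :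
    ∀ (sig : List Int) (aI : List Nat) (aM : List Int) (aL : List String),
      (sig.foldl (fun (acc : List Nat × List Int × List String) datum =>
        let index := aWhile datum partitions 0 partitions.length
        (acc.1 ++ [index],
         acc.2.1 ++ [(PySem.List.pyGet? codebookMidi (index : Int)).getD 0],
         acc.2.2 ++ [(PySem.List.pyGet? codebookLabel (index : Int)).getD ""]))
        (aI, aM, aL)).2
      = sig.foldl (fun (acc : List Int × List String) datum =>
          let lo := bLoop (pmList none partitions) datum 0 (pmList none partitions).length (pmList none partitions).length
          (acc.1 ++ [codebookMidi.getD lo 0], acc.2 ++ [codebookLabel.getD lo ""])) (aM, aL) := by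
  intro sig
  induction sig with
  | nil => intro aI aM aL; rfl
  | cons d rest ih =>
    intro aI aM aL
    simp only [List.foldl_cons]
    rw [ih]
    congr 2
    · rw [idx_eq d partitions, PySem.List.pyGet?_natCast, List.getD_eq_getElem?_getD]
    · rw [idx_eq d partitions, PySem.List.pyGet?_natCast, List.getD_eq_getElem?_getD]

-- ===== VERDICT (by name: the statement is the Claim_ definition above) =====
theorem quantizePitch_spec : Claim_equal_quantizePitch := by
  intro signal partitions codebookMidi codebookLabel _ _
  unfold Spec_quantizePitch quantizePitch quantizePitch_alt
  exact fold_eq partitions codebookMidi codebookLabel signal [] [] []
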